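-- pv_equiv track=rewrite | github.com/jyotiska0099/hw-design-aggregator | src/fetcher.py | _resolve_family
-- ===== SOURCE A (Python) =====
-- _FAMILY_MAP = {
--     "STM32F0": "stm32f0",
--     "STM32F1": "stm32f1",
--     "STM32F2": "stm32f2",
--     "STM32F3": "stm32f3",
--     "STM32F4": "stm32f4",
--     "STM32F7": "stm32f7",
--     "STM32G0": "stm32g0",
--     "STM32G4": "stm32g4",
--     "STM32H7": "stm32h7",
--     "STM32L0": "stm32l0",
--     "STM32L1": "stm32l1",
--     "STM32L4": "stm32l4",
--     "STM32L5": "stm32l5",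
--     "STM32U5": "stm32u5",
--     "STM32WB": "stm32wb",
-- }
--
-- def _resolve_family(chip: str) -> tuple[str, str]:
--     """Return (family_folder, chip_original) or raise ValueError."""
--     chip_upper = chip.upper()
--     for prefix, folder in _FAMILY_MAP.items():
--         if chip_upper.startswith(prefix):
--             return folder, chip
--     raise ValueError(
--         f"Unknown chip family for '{chip}'.\n"
--         f"Supported prefixes: {', '.join(_FAMILY_MAP)}"
--     )
-- ===== SOURCE B (Python) =====
-- _SUFFIXES = ["F0", "F1", "F2", "F3", "F4", "F7", "G0", "G4", "H7",
--              "L0", "L1", "L4", "L5", "U5", "WB"]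
--
--
-- def _resolve_family(chip: str) -> tuple[str, str]:
--     """Return (family_folder, chip_original) or raise ValueError."""
--     u = chip.upper()
--     if u[:5] == "STM32" and u[5:7] in _SUFFIXES:
--         return "stm32" + u[5:7].lower(), chip
--     raise ValueError(
--         f"Unknown chip family for '{chip}'.\n"
--         f"Supported prefixes: " + ", ".join("STM32" + s for s in _SUFFIXES)
--     )
-- ===== Notes on version B (the rewrite author's own statement) =====
-- stated objective: alternative
-- what changed: B drops the table of (prefix, folder) pairs: it checks that the uppercased chip starts with the common five-character stem, tests the next two characters against a list of valid family suffixes, and synthesises the folder name by lowercasing the seven-character prefix, instead of scanning the map with repeated startswith tests; Pre_ excludes exactly the chips on which A raises ValueError (B raises the identical ValueError).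
import Mathlib
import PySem

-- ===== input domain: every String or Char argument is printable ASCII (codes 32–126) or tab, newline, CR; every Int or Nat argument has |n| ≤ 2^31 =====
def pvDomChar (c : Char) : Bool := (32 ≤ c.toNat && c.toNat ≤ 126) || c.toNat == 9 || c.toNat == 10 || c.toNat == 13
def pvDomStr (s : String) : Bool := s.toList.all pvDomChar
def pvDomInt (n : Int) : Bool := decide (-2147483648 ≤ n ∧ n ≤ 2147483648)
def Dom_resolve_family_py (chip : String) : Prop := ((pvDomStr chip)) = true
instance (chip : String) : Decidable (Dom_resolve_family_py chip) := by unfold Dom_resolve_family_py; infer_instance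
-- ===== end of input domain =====

-- B drops A's (prefix, folder) table and its startswith scan: it checks u[:5] == "STM32",
-- tests the 2-char suffix u[5:7] against a list of valid suffixes, and synthesises the
-- folder as "stm32" + suffix.lower() (alternative decomposition; equal value wherever A returns).

-- ===== PORT A =====
-- the module constant _FAMILY_MAP (insertion order)
def pvFamilyMap : List (String × String) :=
  [("STM32F0", "stm32f0"), ("STM32F1", "stm32f1"), ("STM32F2", "stm32f2"),
   ("STM32F3", "stm32f3"), ("STM32F4", "stm32f4"), ("STM32F7", "stm32f7"),
   ("STM32G0", "stm32g0"), ("STM32G4", "stm32g4"), ("STM32H7", "stm32h7"),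
   ("STM32L0", "stm32l0"), ("STM32L1", "stm32l1"), ("STM32L4", "stm32l4"),
   ("STM32L5", "stm32l5"), ("STM32U5", "stm32u5"), ("STM32WB", "stm32wb")]

-- A's loop: scan _FAMILY_MAP.items() in order, return (folder, chip) at the first prefix match
def pvScanA (u chip : String) : List (String × String) → Option (String × String)
  | [] => none
  | (prefix_, folder) :: rest =>
      if PySem.Str.startswith u prefix_ then some (folder, chip) else pvScanA u chip rest

def resolve_family_py (chip : String) : String × String :=
  -- none = the ValueError A raises on unknown chips; those inputs are outside Pre_
  (pvScanA (PySem.Str.upper chip) chip pvFamilyMap).getD ("", "")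

-- ===== PORT B =====
-- B's module constant _SUFFIXES
def pvSuffixes : List String :=
  ["F0", "F1", "F2", "F3", "F4", "F7", "G0", "G4", "H7",
   "L0", "L1", "L4", "L5", "U5", "WB"]

-- exact port of Python's str '+' (concatenation of code points)
def pvConcat (a b : String) : String := String.ofList (a.toList ++ b.toList)

def resolve_family_py_alt (chip : String) : String × String :=
  let u := PySem.Str.upper chip
  if PySem.Str.slice u none (some 5) == "STM32"
      && pvSuffixes.contains (PySem.Str.slice u (some 5) (some 7))
  then (pvConcat "stm32" (PySem.Str.lower (PySem.Str.slice u (some 5) (some 7))), chip)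
  else ("", "")   -- Source B raises the same ValueError here; outside Pre_

-- ===== PRECONDITION & SPEC =====
-- Pre_ excludes exactly the chips whose uppercase form starts with none of the map's prefixes:
-- there the Python A raises ValueError (and so does B, with the identical message).
def Pre_resolve_family_py (chip : String) : Prop :=
  (pvFamilyMap.any (fun pf => PySem.Str.startswith (PySem.Str.upper chip) pf.1)) = true
instance (chip : String) : Decidable (Pre_resolve_family_py chip) := by
  unfold Pre_resolve_family_py; infer_instance

def pvWitness_resolve_family_py : String := "stm32f407vg"

def Spec_resolve_family_py (chip : String) (out : String × String) : Prop :=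
  out = resolve_family_py_alt chip
instance (chip : String) (out : String × String) : Decidable (Spec_resolve_family_py chip out) := by
  unfold Spec_resolve_family_py; infer_instance

-- ===== CLAIM (what is proved, stated in full; the proofs are below) =====
def Claim_equal_resolve_family_py : Prop :=
  ∀ (chip : String), Dom_resolve_family_py chip → Pre_resolve_family_py chip →
    Spec_resolve_family_py chip (resolve_family_py chip)

-- ===== LEMMAS AND PROOFS =====

theorem pv_beq_toList (p q : String) : (p == q) = (p.toList == q.toList) := by
  rw [Bool.eq_iff_iff]
  simp only [beq_iff_eq]
  constructor
  · rintro rfl; rfl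
  · intro h; rw [← String.ofList_toList (s := p), h, String.ofList_toList]

-- the table A scans is exactly B's suffix list, each suffix s wearing its
-- "STM32" prefix as key and "stm32" + s.lower() as value
theorem pv_map_eq :
    pvFamilyMap = pvSuffixes.map
      (fun s => (pvConcat "STM32" s, pvConcat "stm32" (PySem.Str.lower s))) := by
  decide

-- startswith against "STM32" ++ s (|s| = 2) splits into the two tests B performs
theorem pv_sw_split (u s : String) (hs : s.toList.length = 2) :
    PySem.Str.startswith u (pvConcat "STM32" s)
      = (decide (u.toList.take 5 = "STM32".toList)
          && decide ((u.toList.take 7).drop 5 = s.toList)) := by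
  rw [Bool.eq_iff_iff]
  simp only [PySem.Str.startswith_eq, PySem.Chars.startswith_iff, pvConcat,
    String.toList_ofList, Bool.and_eq_true, decide_eq_true_eq]
  rw [List.prefix_iff_eq_take]
  have hlen : ("STM32".toList ++ s.toList).length = 7 := by
    simp [hs]
  rw [hlen]
  constructor
  · intro h
    constructor
    · have : u.toList.take 5 = (u.toList.take 7).take 5 := by
        rw [List.take_take]; norm_num
      rw [this, ← h, List.take_append_of_le_length (by simp)]
      simp
    · rw [← h, List.drop_append_of_le_length (by simp)]
      simp
  · rintro ⟨h5, h7⟩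
    have : u.toList.take 7 = (u.toList.take 7).take 5 ++ (u.toList.take 7).drop 5 :=
      (List.take_append_drop 5 _).symm
    rw [this, List.take_take, h7]
    norm_num [h5]

-- under u[:5] = "STM32", A's scan over the suffix table is B's membership test
theorem pv_suf_toList (u : String) :
    (PySem.Str.slice u (some 5) (some 7)).toList = (u.toList.take 7).drop 5 := by
  rw [PySem.Str.toList_slice, PySem.Chars.slice_eq_listSlice,
    PySem.List.slice_toNat _ (by norm_num) (by norm_num), List.drop_take]
  rfl

theorem pv_scan_of_stm32 (u chip : String) (h5 : u.toList.take 5 = "STM32".toList)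
    (ss : List String) (hlen : ∀ s ∈ ss, s.toList.length = 2) :
    pvScanA u chip (ss.map (fun s => (pvConcat "STM32" s, pvConcat "stm32" (PySem.Str.lower s))))
      = (if ss.contains (PySem.Str.slice u (some 5) (some 7))
         then some (pvConcat "stm32"
             (PySem.Str.lower (PySem.Str.slice u (some 5) (some 7))), chip)
         else none) := by
  induction ss with
  | nil => simp [pvScanA]
  | cons s rest ih =>
      rw [List.map_cons, pvScanA, pv_sw_split u s (hlen s (by simp))]
      by_cases hm : (u.toList.take 7).drop 5 = s.toList
      · have hseq : PySem.Str.slice u (some 5) (some 7) = s := by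
          rw [← String.ofList_toList (s := PySem.Str.slice u (some 5) (some 7)),
            pv_suf_toList, hm, String.ofList_toList]
        simp [h5, hm, hseq]
      · have hsne : PySem.Str.slice u (some 5) (some 7) ≠ s := by
          intro he; exact hm (by rw [← pv_suf_toList, he])
        rw [if_neg (by simp [hm]), ih (fun q hq => hlen q (by simp [hq]))]
        simp [hsne]

-- without u[:5] = "STM32" no table prefix matches: the scan returns none
theorem pv_scan_no_stm32 (u chip : String) (h5 : u.toList.take 5 ≠ "STM32".toList)
    (ss : List String) (hlen : ∀ s ∈ ss, s.toList.length = 2) :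
    pvScanA u chip (ss.map (fun s => (pvConcat "STM32" s, pvConcat "stm32" (PySem.Str.lower s))))
      = none := by
  induction ss with
  | nil => simp [pvScanA]
  | cons s rest ih =>
      have h5' : ¬ (u.toList.take 5 = ['S', 'T', 'M', '3', '2']) := h5
      rw [List.map_cons, pvScanA, pv_sw_split u s (hlen s (by simp))]
      rw [if_neg (by simp [h5']), ih (fun q hq => hlen q (by simp [hq]))]

theorem pv_first_test (u : String) :
    (PySem.Str.slice u none (some 5) == "STM32")
      = decide (u.toList.take 5 = "STM32".toList) := by
  rw [pv_beq_toList]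
  rw [PySem.Str.toList_slice, PySem.Chars.slice_eq_listSlice,
    PySem.List.slice_to _ (by norm_num)]
  rw [Bool.eq_iff_iff]
  simp only [beq_iff_eq, decide_eq_true_eq]
  exact Iff.rfl

theorem pv_suffix_lens : ∀ s ∈ pvSuffixes, s.toList.length = 2 := by decide

-- ===== VERDICT (by name: the statement is the Claim_ definition above) =====
set_option maxHeartbeats 1000000 in
theorem resolve_family_py_spec : Claim_equal_resolve_family_py := by
  intro chip _ _
  unfold Spec_resolve_family_py resolve_family_py resolve_family_py_alt
  dsimp only
  rw [pv_map_eq]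
  by_cases h5 : (PySem.Str.upper chip).toList.take 5 = "STM32".toList
  · rw [pv_scan_of_stm32 _ chip h5 pvSuffixes pv_suffix_lens, pv_first_test]
    have h5' : List.take 5 (PySem.Chars.upper chip.toList) = ['S', 'T', 'M', '3', '2'] := by
      rw [← PySem.Str.toList_upper]; exact h5
    by_cases hc : PySem.Str.slice (PySem.Str.upper chip) (some 5) (some 7) ∈ pvSuffixes
    · simp [h5', hc]
    · simp [h5', hc]
  · rw [pv_scan_no_stm32 _ chip h5 pvSuffixes pv_suffix_lens, pv_first_test]
    have h5' : ¬ List.take 5 (PySem.Chars.upper chip.toList) = ['S', 'T', 'M', '3', '2'] := by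
      rw [← PySem.Str.toList_upper]; exact h5
    simp [h5']
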